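-- pv_equiv track=rewrite | github.com/jeffanberg/Coding_Problems | advent_of_code/day6.py | everyoneYesSum
-- ===== SOURCE A (Python) =====
-- def everyoneYesSum(answers):
--     count = 0
--     for a in answers:
--         current = set(list(a[0]))
--         if len(a) > 1:
--             i = 1
--             while i < len(a):
--                 current = current & set(list(a[i]))
--                 i += 1
--         count += len(current)
--     return count
-- ===== SOURCE B (Python) =====
-- def everyoneYesSum(answers):
--     total = 0
--     for group in answers:
--         counts = {}
--         for person in group:
--             for ch in set(person):
--                 counts[ch] = counts.get(ch, 0) + 1
--         n = len(group)
--         total += sum(1 for c in counts.values() if c == n)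
--     return total
-- ===== Notes on version B (the rewrite author's own statement) =====
-- stated objective: idiomatic
-- what changed: Per group, instead of iteratively intersecting per-person letter sets, B builds one letter-frequency dictionary over the deduplicated persons and counts the letters whose frequency equals the group size.
import Mathlib
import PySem

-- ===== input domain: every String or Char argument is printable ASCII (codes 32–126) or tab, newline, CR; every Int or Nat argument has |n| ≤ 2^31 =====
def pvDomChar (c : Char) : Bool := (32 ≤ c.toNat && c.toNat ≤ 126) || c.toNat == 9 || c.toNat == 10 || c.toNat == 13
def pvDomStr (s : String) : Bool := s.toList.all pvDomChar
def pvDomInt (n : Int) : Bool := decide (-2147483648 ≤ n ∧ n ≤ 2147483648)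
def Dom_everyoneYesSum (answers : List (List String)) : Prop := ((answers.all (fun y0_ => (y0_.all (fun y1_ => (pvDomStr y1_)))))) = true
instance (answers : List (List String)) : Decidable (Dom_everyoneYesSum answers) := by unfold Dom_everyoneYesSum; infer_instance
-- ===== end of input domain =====

-- B replaces A's repeated set intersections per group by one letter-frequency dictionary per group,
-- counting the letters everyone answered (idiomatic counting; same asymptotic cost).

-- ===== PORT A =====
-- the 'while i < len(a): current = current & set(list(a[i])); i += 1' loop
def pvInterGo (a : List String) (current : PySem.Set Char) (i : Nat) : PySem.Set Char :=
  if _h : i < a.length then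
    pvInterGo a (PySem.Set.inter current (PySem.Set.ofList (PySem.List.pyGetD a (i : Int) "").toList)) (i + 1)
  else current
termination_by a.length - i

def everyoneYesSum (answers : List (List String)) : Int :=
  answers.foldl (fun count a =>
    -- current = set(list(a[0])); a[0] is total here because Pre_ excludes empty groups
    let current := PySem.Set.ofList (PySem.List.pyGetD a (0 : Int) "").toList
    let current := if 1 < a.length then pvInterGo a current 1 else current
    count + PySem.Set.len current) 0

-- ===== PORT B =====
def everyoneYesSum_alt (answers : List (List String)) : Int :=
  answers.foldl (fun total group =>
    let counts : PySem.Dict Char Int :=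
      group.foldl (fun d person =>
        (PySem.Set.ofList person.toList).foldl (fun d ch => d.insert ch (d.getD ch 0 + 1)) d)
        PySem.Dict.empty
    let n : Int := group.length
    total + ((counts.values.filter (fun c => c == n)).length : Int)) 0

-- ===== PRECONDITION & SPEC =====
-- Pre_ excludes inputs containing an empty group: A's 'a[0]' raises IndexError there (B would return normally, counting such a group as 0).
def Pre_everyoneYesSum (answers : List (List String)) : Prop := ∀ a ∈ answers, a ≠ []
instance (answers : List (List String)) : Decidable (Pre_everyoneYesSum answers) := by unfold Pre_everyoneYesSum; infer_instance
def pvWitness_everyoneYesSum : List (List String) := [["ab", "b"], ["c"]]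

def Spec_everyoneYesSum (answers : List (List String)) (out : Int) : Prop := out = everyoneYesSum_alt answers
instance (answers : List (List String)) (out : Int) : Decidable (Spec_everyoneYesSum answers out) := by unfold Spec_everyoneYesSum; infer_instance

-- ===== CLAIM (what is proved, stated in full; the proofs are below) =====
def Claim_equal_everyoneYesSum : Prop := ∀ (answers : List (List String)), Dom_everyoneYesSum answers → Pre_everyoneYesSum answers → Spec_everyoneYesSum answers (everyoneYesSum answers)

-- ===== LEMMAS AND PROOFS =====

-- A's while loop is the fold of set intersections over the tail of the group
theorem pvInterGo_eq_foldl (a : List String) (i : Nat) (cur : PySem.Set Char) :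
    pvInterGo a cur i
      = (a.drop i).foldl (fun s p => PySem.Set.inter s (PySem.Set.ofList p.toList)) cur := by
  unfold pvInterGo
  split
  · rename_i h
    rw [pvInterGo_eq_foldl a (i + 1)]
    rw [List.drop_eq_getElem_cons h, List.foldl_cons,
      PySem.List.pyGetD_eq_getElem a "" (by omega) (by exact_mod_cast h)]
    simp
  · rename_i h
    rw [List.drop_eq_nil_of_le (by omega), List.foldl_nil]
termination_by a.length - i

-- invariant of the intersection fold: Nodup, and membership = "in cur and in every person"
theorem pvFoldInter_invariant (l : List String) (cur : PySem.Set Char) (hnd : cur.Nodup) :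
    (l.foldl (fun s p => PySem.Set.inter s (PySem.Set.ofList p.toList)) cur).Nodup ∧
    ∀ c, c ∈ l.foldl (fun s p => PySem.Set.inter s (PySem.Set.ofList p.toList)) cur ↔
      c ∈ cur ∧ ∀ p ∈ l, c ∈ p.toList := by
  induction l generalizing cur with
  | nil => simpa using hnd
  | cons h t ih =>
    obtain ⟨h1, h2⟩ := ih (PySem.Set.inter cur (PySem.Set.ofList h.toList))
      (PySem.Set.nodup_inter _ _ hnd)
    refine ⟨h1, fun c => ?_⟩
    rw [List.foldl_cons, h2 c, PySem.Set.mem_inter, PySem.Set.mem_ofList]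
    constructor
    · rintro ⟨⟨hc, hh⟩, ht⟩
      exact ⟨hc, by simpa using And.intro hh ht⟩
    · rintro ⟨hc, hall⟩
      exact ⟨⟨hc, hall h (by simp)⟩, fun p hp => hall p (by simp [hp])⟩

-- B's counter: the count stored at c is the number of persons of the group containing c
theorem pvCounts_getD (group : List String) (d : PySem.Dict Char Int) (c : Char) :
    (group.foldl (fun d person =>
        (PySem.Set.ofList person.toList).foldl (fun d ch => d.insert ch (d.getD ch 0 + 1)) d) d).getD c 0
      = d.getD c 0 + (group.countP (fun p => decide (c ∈ p.toList)) : Int) := by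
  induction group generalizing d with
  | nil => simp
  | cons h t ih =>
    rw [List.foldl_cons, ih, PySem.Dict.getD_foldl_insert_add_one]
    by_cases hm : c ∈ h.toList
    · rw [List.count_eq_one_of_mem (PySem.Set.nodup_ofList _) (by simpa [PySem.Set.mem_ofList] using hm)]
      simp [hm]; ring
    · rw [List.count_eq_zero.mpr (by simpa [PySem.Set.mem_ofList] using hm)]
      simp [hm]

-- B's counter: its keys are exactly the letters occurring somewhere in the group, without duplicates
theorem pvCounts_keys (group : List String) (d : PySem.Dict Char Int) (hnd : d.keys.Nodup) :
    (group.foldl (fun d person =>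
        (PySem.Set.ofList person.toList).foldl (fun d ch => d.insert ch (d.getD ch 0 + 1)) d) d).keys.Nodup ∧
    ∀ c, c ∈ (group.foldl (fun d person =>
        (PySem.Set.ofList person.toList).foldl (fun d ch => d.insert ch (d.getD ch 0 + 1)) d) d).keys ↔
      c ∈ d.keys ∨ ∃ p ∈ group, c ∈ p.toList := by
  induction group generalizing d with
  | nil => simpa using hnd
  | cons h t ih =>
    obtain ⟨h1, h2⟩ := ih ((PySem.Set.ofList h.toList).foldl (fun d ch => d.insert ch (d.getD ch 0 + 1)) d)
      (PySem.Dict.nodup_keys_foldl_insert _ _ _ hnd)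
    refine ⟨h1, fun c => ?_⟩
    rw [List.foldl_cons, h2 c, PySem.Dict.keys_foldl_insert, PySem.Set.mem_update, PySem.Set.mem_ofList]
    constructor
    · rintro (⟨hc | hh⟩ | ⟨p, hp, hcp⟩)
      · exact Or.inl hc
      · exact Or.inr ⟨h, by simp, hh⟩
      · exact Or.inr ⟨p, by simp [hp], hcp⟩
    · rintro (hc | ⟨p, hp, hcp⟩)
      · exact Or.inl (Or.inl hc)
      · rcases List.mem_cons.mp hp with rfl | hp'
        · exact Or.inl (Or.inr hcp)
        · exact Or.inr ⟨p, hp', hcp⟩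

-- per nonempty group, A's intersection size equals B's everyone-answered count
theorem pvGroup_eq (a : List String) (ha : a ≠ []) :
    (let current := PySem.Set.ofList (PySem.List.pyGetD a (0 : Int) "").toList
     let current := if 1 < a.length then pvInterGo a current 1 else current
     PySem.Set.len current)
      =
    (let counts : PySem.Dict Char Int :=
       a.foldl (fun d person =>
         (PySem.Set.ofList person.toList).foldl (fun d ch => d.insert ch (d.getD ch 0 + 1)) d)
         PySem.Dict.empty
     ((counts.values.filter (fun c => c == (a.length : Int))).length : Int)) := by
  show PySem.Set.len _ = ((_ : Nat) : Int)
  obtain ⟨h, t, rfl⟩ := List.exists_cons_of_ne_nil ha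
  -- the A side: with or without the 'len > 1' guard the result is the fold over the tail
  have hA : (if 1 < (h :: t).length then pvInterGo (h :: t) (PySem.Set.ofList (PySem.List.pyGetD (h :: t) (0 : Int) "").toList) 1
        else PySem.Set.ofList (PySem.List.pyGetD (h :: t) (0 : Int) "").toList)
      = t.foldl (fun s p => PySem.Set.inter s (PySem.Set.ofList p.toList)) (PySem.Set.ofList h.toList) := by
    have hget : PySem.List.pyGetD (h :: t) (0 : Int) "" = h := by
      rw [PySem.List.pyGetD_eq_getElem (h :: t) "" (by omega) (by simp)]
      simp
    rw [hget]
    split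
    · rw [pvInterGo_eq_foldl]; simp
    · rename_i hlen
      have : t = [] := by
        cases t with
        | nil => rfl
        | cons x xs => exfalso; simp at hlen
      subst this; simp
  rw [hA]
  obtain ⟨hSnd, hSmem⟩ := pvFoldInter_invariant t (PySem.Set.ofList h.toList) (PySem.Set.nodup_ofList _)
  obtain ⟨hKnd, hKmem⟩ := pvCounts_keys (h :: t) PySem.Dict.empty (by simp [PySem.Dict.keys_empty])
  set counts : PySem.Dict Char Int :=
    (h :: t).foldl (fun d person =>
      (PySem.Set.ofList person.toList).foldl (fun d ch => d.insert ch (d.getD ch 0 + 1)) d)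
      PySem.Dict.empty with hc
  -- the B side: values → keys filtered by the count condition
  rw [PySem.Dict.values_eq_map_keys counts hKnd 0, List.filter_map, List.length_map]
  -- both lists are Nodup with the same membership, hence a permutation, hence equal length
  have hperm :
      (t.foldl (fun s p => PySem.Set.inter s (PySem.Set.ofList p.toList)) (PySem.Set.ofList h.toList)).Perm
        (counts.keys.filter ((fun c => c == ((h :: t).length : Int)) ∘ fun k => counts.getD k 0)) := by
    rw [List.perm_ext_iff_of_nodup hSnd (hKnd.filter _)]
    intro c
    rw [hSmem c, List.mem_filter, hKmem c, PySem.Set.mem_ofList]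
    have hcnt : counts.getD c 0 = ((h :: t).countP (fun p => decide (c ∈ p.toList)) : Int) := by
      rw [hc, pvCounts_getD]; simp
    constructor
    · rintro ⟨hh, ht⟩
      have hall : ∀ p ∈ h :: t, c ∈ p.toList := by
        intro p hp; rcases List.mem_cons.mp hp with rfl | hp'
        · exact hh
        · exact ht p hp'
      refine ⟨Or.inr ⟨h, by simp, hh⟩, ?_⟩
      have : (h :: t).countP (fun p => decide (c ∈ p.toList)) = (h :: t).length :=
        List.countP_eq_length.mpr (fun p hp => by simpa using hall p hp)
      simp [Function.comp, hcnt, this]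
    · rintro ⟨_, hcount⟩
      have : (h :: t).countP (fun p => decide (c ∈ p.toList)) = (h :: t).length := by
        have := hcount
        simp only [Function.comp, hcnt, beq_iff_eq] at this
        exact_mod_cast this
      have hall := List.countP_eq_length.mp this
      exact ⟨by simpa using hall h (by simp), fun p hp => by simpa using hall p (by simp [hp])⟩
  rw [show ∀ (s : PySem.Set Char), PySem.Set.len s = (s.length : Int) from fun s => by simp [PySem.Set.len], hperm.length_eq]

-- ===== VERDICT (by name: the statement is the Claim_ definition above) =====
theorem pvFoldl_eq (answers : List (List String)) (acc : Int)
    (hpre : ∀ a ∈ answers, a ≠ []) :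
    answers.foldl (fun count a =>
      let current := PySem.Set.ofList (PySem.List.pyGetD a (0 : Int) "").toList
      let current := if 1 < a.length then pvInterGo a current 1 else current
      count + PySem.Set.len current) acc
    = answers.foldl (fun total group =>
      let counts : PySem.Dict Char Int :=
        group.foldl (fun d person =>
          (PySem.Set.ofList person.toList).foldl (fun d ch => d.insert ch (d.getD ch 0 + 1)) d)
          PySem.Dict.empty
      let n : Int := group.length
      total + ((counts.values.filter (fun c => c == n)).length : Int)) acc := by
  induction answers generalizing acc with
  | nil => rfl
  | cons a t ih =>
    rw [List.foldl_cons, List.foldl_cons]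
    have := pvGroup_eq a (hpre a (by simp))
    simp only [] at this ⊢
    rw [this]
    exact ih _ (fun b hb => hpre b (by simp [hb]))

theorem everyoneYesSum_spec : Claim_equal_everyoneYesSum := by
  intro answers _ hpre
  unfold Spec_everyoneYesSum everyoneYesSum everyoneYesSum_alt
  exact pvFoldl_eq answers 0 hpre
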